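-- pv_equiv track=rewrite | github.com/vboughner/griljor | pipeline/parse_objs.py | bitmap_to_pixels
-- ===== SOURCE A (Python) =====
-- def bitmap_to_pixels(raw_bytes, width=32, height=32):
--     """Convert raw XBM-style bitmap bytes to grayscale pixel list (0=black, 255=white)."""
--     row_bytes = (width + 7) // 8
--     pixels = []
--     for y in range(height):
--         for x in range(width):
--             byte_idx = y * row_bytes + (x // 8)
--             if byte_idx < len(raw_bytes):
--                 bit = (raw_bytes[byte_idx] >> (x % 8)) & 1
--             else:
--                 bit = 0
--             pixels.append(0 if bit else 255)
--     return pixels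
-- ===== SOURCE B (Python) =====
-- # Byte-oriented rewrite: a 256-entry lookup table maps each byte value to its 8
-- # LSB-first grayscale pixels; rows are built byte-by-byte with the last byte truncated.
-- _TABLE = [[0 if (v >> j) & 1 else 255 for j in range(8)] for v in range(256)]
--
-- def bitmap_to_pixels(raw_bytes, width=32, height=32):
--     row_bytes = (width + 7) // 8
--     n = len(raw_bytes)
--     pixels = []
--     for y in range(height):
--         for b in range(row_bytes):
--             idx = y * row_bytes + b
--             value = raw_bytes[idx] % 256 if idx < n else 0
--             pixels.extend(_TABLE[value][:min(8, width - 8 * b)])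
--     return pixels
-- ===== Notes on version B (the rewrite author's own statement) =====
-- stated objective: alternative
-- what changed: Replaces the per-pixel byte-index/shift computation with a precomputed 256-entry byte-to-8-pixels lookup table and a per-byte loop that extends the output with a truncated table row.
import Mathlib
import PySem

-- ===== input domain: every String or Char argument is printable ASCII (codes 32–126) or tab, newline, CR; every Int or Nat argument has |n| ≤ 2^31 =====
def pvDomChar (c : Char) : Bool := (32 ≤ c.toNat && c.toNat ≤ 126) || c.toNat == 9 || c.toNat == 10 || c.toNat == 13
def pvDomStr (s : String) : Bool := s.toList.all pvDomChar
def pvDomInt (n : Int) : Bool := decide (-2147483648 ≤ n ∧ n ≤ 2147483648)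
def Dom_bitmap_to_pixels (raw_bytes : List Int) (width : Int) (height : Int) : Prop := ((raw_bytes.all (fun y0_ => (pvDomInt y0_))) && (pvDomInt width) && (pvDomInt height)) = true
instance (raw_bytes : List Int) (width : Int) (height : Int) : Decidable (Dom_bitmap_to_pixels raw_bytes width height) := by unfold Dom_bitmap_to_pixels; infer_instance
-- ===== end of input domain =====

-- B replaces A's per-pixel byte-index/shift computation by a 256-entry byte-to-8-pixel lookup table and a per-byte loop (alternative structure, same result).

-- ===== PORT A =====
def bitmap_to_pixels (raw_bytes : List Int) (width : Int) (height : Int) : List Int :=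
  let row_bytes := PySem.Int.floordiv (width + 7) 8
  (PySem.List.pyRange 0 height 1).foldl (fun pixels y =>
    (PySem.List.pyRange 0 width 1).foldl (fun pixels x =>
      let byte_idx := y * row_bytes + PySem.Int.floordiv x 8
      let bit : Int :=
        if byte_idx < (raw_bytes.length : Int) then
          PySem.Int.band ((PySem.List.pyGetD raw_bytes byte_idx 0) >>> (PySem.Int.mod x 8).toNat) 1
        else 0
      pixels ++ [if bit ≠ 0 then 0 else 255]) pixels) []

-- ===== PORT B =====
def pvByteRow (v : Int) : List Int :=
  (PySem.List.pyRange 0 8 1).map (fun j => if PySem.Int.band (v >>> j.toNat) 1 ≠ 0 then 0 else 255)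

def pvTable : List (List Int) := (PySem.List.pyRange 0 256 1).map pvByteRow


def bitmap_to_pixels_alt (raw_bytes : List Int) (width : Int) (height : Int) : List Int :=
  let row_bytes := PySem.Int.floordiv (width + 7) 8
  let n : Int := raw_bytes.length
  (PySem.List.pyRange 0 height 1).foldl (fun pixels y =>
    (PySem.List.pyRange 0 row_bytes 1).foldl (fun pixels b =>
      let idx := y * row_bytes + b
      let value : Int := if idx < n then PySem.Int.mod (PySem.List.pyGetD raw_bytes idx 0) 256 else 0
      pixels ++ PySem.List.slice (PySem.List.pyGetD pvTable value []) none (some (min 8 (width - 8 * b)))) pixels) []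

-- ===== PRECONDITION & SPEC =====
def Spec_bitmap_to_pixels (raw_bytes : List Int) (width : Int) (height : Int) (out : List Int) : Prop := out = bitmap_to_pixels_alt raw_bytes width height
instance (raw_bytes : List Int) (width : Int) (height : Int) (out : List Int) : Decidable (Spec_bitmap_to_pixels raw_bytes width height out) := by unfold Spec_bitmap_to_pixels; infer_instance

-- ===== CLAIM (what is proved, stated in full; the proofs are below) =====
def Claim_equal_bitmap_to_pixels : Prop := ∀ (raw_bytes : List Int) (width : Int) (height : Int), Dom_bitmap_to_pixels raw_bytes width height → Spec_bitmap_to_pixels raw_bytes width height (bitmap_to_pixels raw_bytes width height)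

-- ===== LEMMAS AND PROOFS =====

theorem pvParity (v : Int) (j : Nat) (hj : j < 8) :
    PySem.Int.band ((PySem.Int.mod v 256) >>> j) 1 = PySem.Int.band (v >>> j) 1 := by
  rw [PySem.Int.band_one, PySem.Int.band_one,
      PySem.Int.mod_eq_emod_of_pos (a := (PySem.Int.mod v 256) >>> j) (by norm_num),
      PySem.Int.mod_eq_emod_of_pos (a := v >>> j) (by norm_num),
      PySem.Int.mod_eq_emod_of_pos (a := v) (by norm_num),
      Int.shiftRight_eq_div_pow, Int.shiftRight_eq_div_pow]
  interval_cases j <;> norm_num <;> omega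


theorem pvChunkEq (raw : List Int) (w rb y b : Int) (_hb : 0 ≤ b) (hbw : 8 * b < w) :
    (PySem.List.pyRange (8 * b) (min (8 * b + 8) w) 1).map
      (fun x => if (if y * rb + PySem.Int.floordiv x 8 < (raw.length : Int) then
            PySem.Int.band ((PySem.List.pyGetD raw (y * rb + PySem.Int.floordiv x 8) 0) >>> (PySem.Int.mod x 8).toNat) 1
          else 0) ≠ 0 then (0 : Int) else 255)
    = PySem.List.slice (PySem.List.pyGetD pvTable
        (if y * rb + b < (raw.length : Int) then PySem.Int.mod (PySem.List.pyGetD raw (y * rb + b) 0) 256 else 0) [])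
        none (some (min 8 (w - 8 * b))) := by
  set v : Int := if y * rb + b < (raw.length : Int) then PySem.Int.mod (PySem.List.pyGetD raw (y * rb + b) 0) 256 else 0 with hv
  have hv0 : 0 ≤ v := by
    rw [hv]; split
    · exact PySem.Int.mod_nonneg _ (by norm_num)
    · norm_num
  have hv256 : v < 256 := by
    rw [hv]; split
    · exact PySem.Int.mod_lt _ (by norm_num)
    · norm_num
  have htab : PySem.List.pyGetD pvTable v [] = pvByteRow v := by
    rw [pvTable]; exact PySem.List.pyGetD_map_pyRange_of_nonneg pvByteRow 256 v [] hv0 hv256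
  set m : Int := min 8 (w - 8 * b) with hm
  have hm1 : 1 ≤ m := by omega
  have hm8 : m ≤ 8 := by omega
  have hmin : min (8 * b + 8) w = 8 * b + m := by omega
  rw [hmin, htab, PySem.List.slice_to _ (show (0:Int) ≤ m by omega), pvByteRow,
      PySem.List.pyRange_one (8 * b) (8 * b + m), PySem.List.pyRange_one 0 8,
      List.map_map, List.map_map, ← List.map_take, List.take_range]
  have hmn : min m.toNat ((8:Int) - 0).toNat = m.toNat := by omega
  rw [hmn]
  have harg : (8 * b + m - 8 * b).toNat = m.toNat := by omega
  rw [harg]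
  apply List.map_congr_left
  intro k hk
  have hk8 : (k : Int) < 8 := by
    have := List.mem_range.mp hk; omega
  have hk0 : (0 : Int) ≤ k := by positivity
  simp only [Function.comp]
  have hdiv : PySem.Int.floordiv (8 * b + (k : Int)) 8 = b := by
    rw [PySem.Int.floordiv_eq_iff_of_pos (by norm_num)]; constructor <;> omega
  have hmod : PySem.Int.mod (8 * b + (k : Int)) 8 = (k : Int) := by
    rw [PySem.Int.mod_eq_emod_of_pos (by norm_num)]; omega
  rw [hdiv, hmod]
  have htn : ((0 : Int) + (k : Int)).toNat = k := by omega
  have htn2 : ((k : Int)).toNat = k := by omega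
  rw [hv, htn, htn2]
  simp only [Int.shiftRight_natCast_right]
  split
  · rw [pvParity _ k (by omega)]
  · norm_num
    decide

theorem pvChunks (w : Int) (k : Nat) (hk : (k : Int) ≤ PySem.Int.floordiv (w + 7) 8) :
    PySem.List.pyRange 0 (min (8 * (k : Int)) w) 1
      = (PySem.List.pyRange 0 (k : Int) 1).flatMap (fun b => PySem.List.pyRange (8 * b) (min (8 * b + 8) w) 1) := by
  have hbr := (PySem.Int.floordiv_eq_iff_of_pos (a := w + 7) (b := 8)
      (q := PySem.Int.floordiv (w + 7) 8) (by norm_num)).mp rfl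
  induction k with
  | zero => simp [PySem.List.pyRange_one_eq_nil]
  | succ k ih =>
    have hk' : (k : Int) ≤ PySem.Int.floordiv (w + 7) 8 := by push_cast at hk ⊢; omega
    have h8k : 8 * (k : Int) < w := by push_cast at hk; omega
    have hcast : ((k + 1 : Nat) : Int) = (k : Int) + 1 := by push_cast; ring
    rw [hcast, PySem.List.pyRange_one_succ_right (by positivity), List.flatMap_append,
        ← ih hk', List.flatMap_cons, List.flatMap_nil, List.append_nil]
    have hmink : min (8 * (k : Int)) w = 8 * (k : Int) := by omega
    rw [hmink]
    have hminsucc : min (8 * ((k : Int) + 1)) w = min (8 * (k : Int) + 8) w := by ring_nf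
    rw [hminsucc]
    exact PySem.List.pyRange_one_append 0 (8 * (k : Int)) (min (8 * (k : Int) + 8) w)
      (by positivity) (by omega)

theorem pvRow (raw : List Int) (w y : Int) :
    (PySem.List.pyRange 0 w 1).map
      (fun x => if (if y * PySem.Int.floordiv (w + 7) 8 + PySem.Int.floordiv x 8 < (raw.length : Int) then
            PySem.Int.band ((PySem.List.pyGetD raw (y * PySem.Int.floordiv (w + 7) 8 + PySem.Int.floordiv x 8) 0) >>> (PySem.Int.mod x 8).toNat) 1
          else 0) ≠ 0 then (0 : Int) else 255)
    = (PySem.List.pyRange 0 (PySem.Int.floordiv (w + 7) 8) 1).flatMap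
        (fun b => PySem.List.slice (PySem.List.pyGetD pvTable
          (if y * PySem.Int.floordiv (w + 7) 8 + b < (raw.length : Int) then
              PySem.Int.mod (PySem.List.pyGetD raw (y * PySem.Int.floordiv (w + 7) 8 + b) 0) 256 else 0) [])
          none (some (min 8 (w - 8 * b)))) := by
  set rb : Int := PySem.Int.floordiv (w + 7) 8 with hrb
  have hbr := (PySem.Int.floordiv_eq_iff_of_pos (a := w + 7) (b := 8) (q := rb) (by norm_num)).mp hrb.symm
  by_cases hw : w ≤ 0
  · have h1 : PySem.List.pyRange 0 w 1 = [] := PySem.List.pyRange_one_eq_nil hw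
    have h2 : PySem.List.pyRange 0 rb 1 = [] := PySem.List.pyRange_one_eq_nil (by omega)
    rw [h1, h2]; rfl
  · have hrb1 : 1 ≤ rb := by omega
    have hwrb : w ≤ 8 * rb := by omega
    have hkcast : ((rb.toNat : Nat) : Int) = rb := by omega
    have hmin : min (8 * ((rb.toNat : Nat) : Int)) w = w := by omega
    have hw' : PySem.List.pyRange 0 w 1 = PySem.List.pyRange 0 (min (8 * ((rb.toNat : Nat) : Int)) w) 1 := by rw [hmin]
    rw [hw', pvChunks w rb.toNat (by omega), hkcast, List.map_flatMap]
    apply List.flatMap_congr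
    intro b hb
    have hmem := (PySem.List.mem_pyRange_one).mp hb
    exact pvChunkEq raw w rb y b hmem.1 (by omega)

-- ===== VERDICT (by name: the statement is the Claim_ definition above) =====
theorem bitmap_to_pixels_spec : Claim_equal_bitmap_to_pixels := by
  intro raw w h _
  unfold Spec_bitmap_to_pixels bitmap_to_pixels bitmap_to_pixels_alt
  simp only [PySem.List.foldl_append_singleton_eq_map, PySem.List.foldl_append_eq_flatMap,
    List.nil_append]
  exact List.flatMap_congr (fun y _ => pvRow raw w y)
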